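-- pv_equiv track=rewrite | github.com/jdewald/AoC2024 | 08/main.py | parse_antennas
-- ===== SOURCE A (Python) =====
-- from typing import Dict, List, Tuple
--
-- def parse_antennas(data: List[List[str]]) -> Dict[str, List[Tuple[int,int]]]:
--     antennas = {}
--
--     for i in range(len(data)):
--         for j in range(len(data[i])):
--             if data[i][j] == '.':
--                 continue
--             if data[i][j] not in antennas:
--                 antennas[data[i][j]] = []
--             antennas[data[i][j]].append((i, j))
--
--     return antennas
-- ===== SOURCE B (Python) =====
-- def parse_antennas(data):
--     # Two staged passes instead of a dict accumulated in one scan: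
--     # (1) collect the distinct non-'.' symbols in first-occurrence order,
--     # (2) for each symbol, re-scan the grid and gather its coordinates.
--     symbols = []
--     for row in data:
--         for c in row:
--             if c != '.' and c not in symbols:
--                 symbols.append(c)
--     return {s: [(i, j)
--                 for i, row in enumerate(data)
--                 for j, c in enumerate(row)
--                 if c == s]
--             for s in symbols}
-- ===== Notes on version B (the rewrite author's own statement) =====
-- stated objective: alternative
-- what changed: A accumulates a dict in one grid scan with a membership-test-then-append per cell; B has no accumulating dict: it first collects the distinct non-'.' symbols in first-occurrence order, then for each symbol re-scans the whole grid with a comprehension to gather that symbol's coordinates (staged per-symbol nested scans).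
import Mathlib
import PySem

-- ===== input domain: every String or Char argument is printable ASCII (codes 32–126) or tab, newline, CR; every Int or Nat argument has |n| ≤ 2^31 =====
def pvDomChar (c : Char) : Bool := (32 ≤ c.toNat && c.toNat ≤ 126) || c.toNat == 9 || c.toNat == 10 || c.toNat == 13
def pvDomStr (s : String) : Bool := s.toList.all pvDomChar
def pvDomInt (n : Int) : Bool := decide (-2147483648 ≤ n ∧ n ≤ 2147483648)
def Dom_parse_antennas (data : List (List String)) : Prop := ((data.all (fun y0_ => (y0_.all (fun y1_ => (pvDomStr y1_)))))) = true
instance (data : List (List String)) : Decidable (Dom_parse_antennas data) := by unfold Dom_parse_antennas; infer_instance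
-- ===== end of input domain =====

-- B replaces A's single-pass dict accumulation by two staged passes: collect the distinct
-- symbols first, then re-scan the grid once per symbol for its coordinates (alternative).
-- ===== PORT A =====
def parse_antennas (data : List (List String)) : List (String × List (Int × Int)) :=
  (PySem.List.pyRange 0 (data.length : Int) 1).foldl (fun antennas i =>
    let row := PySem.List.pyGetD data i []
    (PySem.List.pyRange 0 (row.length : Int) 1).foldl (fun antennas j =>
      let c := PySem.List.pyGetD row j ""
      if c == "." then antennas
      else
        let antennas := if antennas.contains c = false then antennas.insert c [] else antennas
        antennas.modify c [] (fun l => l ++ [(i, j)])) antennas)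
    (PySem.Dict.empty : PySem.Dict String (List (Int × Int)))
  |>.items

-- ===== PORT B =====
def parse_antennas_alt (data : List (List String)) : List (String × List (Int × Int)) :=
  ((data.foldl (fun syms row =>
    row.foldl (fun syms c =>
      if c != "." && !(syms.contains c) then syms ++ [c] else syms) syms)
    ([] : List String)).foldl (fun d s =>
      d.insert s ((PySem.List.enumerate data).flatMap (fun ir =>
        (PySem.List.enumerate ir.2).filterMap (fun jc =>
          if jc.2 == s then some (ir.1, jc.1) else none))))
    (PySem.Dict.empty : PySem.Dict String (List (Int × Int)))).items

-- ===== PRECONDITION & SPEC =====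
def Spec_parse_antennas (data : List (List String)) (out : List (String × List (Int × Int))) : Prop := out = parse_antennas_alt data
instance (data : List (List String)) (out : List (String × List (Int × Int))) : Decidable (Spec_parse_antennas data out) := by unfold Spec_parse_antennas; infer_instance

-- ===== CLAIM (what is proved, stated in full; the proofs are below) =====
def Claim_equal_parse_antennas : Prop := ∀ (data : List (List String)), Dom_parse_antennas data → Spec_parse_antennas data (parse_antennas data)

-- ===== LEMMAS AND PROOFS =====

-- the dict-building step of A: d[c].append(q) with default []
def pvStep (d : PySem.Dict String (List (Int × Int))) (p : String × (Int × Int)) :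
    PySem.Dict String (List (Int × Int)) :=
  d.modify p.1 [] (fun l => l ++ [p.2])

-- the grid flattened to (symbol, coord) pairs of the non-'.' cells, row-major
def pvFlat (data : List (List String)) : List (String × (Int × Int)) :=
  (PySem.List.enumerate data).flatMap (fun ir =>
    (PySem.List.enumerate ir.2).filterMap (fun jc =>
      if jc.2 != "." then some (jc.2, (ir.1, jc.1)) else none))

-- A's "insert [] if missing, then append" equals a single modify-with-default
lemma pvStepA_eq (d : PySem.Dict String (List (Int × Int))) (c : String) (q : Int × Int) :
    (if d.contains c = false then d.insert c [] else d).modify c [] (fun l => l ++ [q]) =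
    pvStep d (c, q) := by
  by_cases h : d.contains c
  · simp [pvStep, h]
  · have h' : d.contains c = false := by simpa using h
    simp [pvStep, h', PySem.Dict.modify, PySem.Dict.getD_insert_self,
      PySem.Dict.getD_of_not_contains d [] h', PySem.Dict.insert_insert_self]

-- A's nested index loops are the fold of pvStep over the flat (symbol, coord) list
lemma parse_antennas_eq_flat_fold (data : List (List String)) :
    parse_antennas data = ((pvFlat data).foldl pvStep PySem.Dict.empty).items := by
  unfold parse_antennas pvFlat
  rw [List.foldl_flatMap]
  rw [PySem.List.enumerate_eq_map_pyRange data ([] : List String), List.foldl_map]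
  simp only [PySem.List.len]
  apply congrArg
  apply List.foldl_ext
  intro a i _
  rw [List.foldl_filterMap]
  rw [PySem.List.enumerate_eq_map_pyRange (PySem.List.pyGetD data i []) "", List.foldl_map]
  simp only [PySem.List.len]
  apply List.foldl_ext
  intro a j _
  by_cases h : PySem.List.pyGetD (PySem.List.pyGetD data i []) j "" == "."
  · have hc : PySem.List.pyGetD (PySem.List.pyGetD data i []) j "" = "." := by simpa using h
    simp [hc]
  · simp only [h, bne, Bool.not_false, if_neg, Bool.false_eq_true, not_false_eq_true, if_true]
    exact pvStepA_eq a _ _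

-- A's items: distinct symbols in first-occurrence order, each with its coordinates
lemma parse_antennas_eq_map (data : List (List String)) :
    parse_antennas data =
      (PySem.Set.ofList ((pvFlat data).map (fun p => p.1))).map
        (fun c => (c, ((pvFlat data).filter (fun p => p.1 == c)).map (fun p => p.2))) := by
  rw [parse_antennas_eq_flat_fold]
  have hnd : ((pvFlat data).foldl pvStep PySem.Dict.empty).keys.Nodup := by
    have := PySem.Dict.nodup_keys_foldl_modify_key (pvFlat data) (fun p => p.1) []
      (fun _ p l' => l' ++ [p.2]) PySem.Dict.empty (by simp [PySem.Dict.keys_empty])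
    simpa [pvStep] using this
  have hkeys : ((pvFlat data).foldl pvStep PySem.Dict.empty).keys =
      PySem.Set.ofList ((pvFlat data).map (fun p => p.1)) := by
    have h1 := PySem.Dict.keys_foldl_modify_key (pvFlat data) (fun p => p.1) []
      (fun _ p l' => l' ++ [p.2]) PySem.Dict.empty
    simpa [pvStep, PySem.Dict.keys_empty, PySem.Set.update_nil_left] using h1
  rw [PySem.Dict.items_eq_map_keys _ hnd [], hkeys]
  apply List.map_congr_left
  intro c _
  have hfold : List.foldl pvStep =
      List.foldl (fun (d : PySem.Dict String (List (Int × Int))) p =>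
        d.modify p.1 [] (fun l => l ++ [p.2])) := rfl
  rw [hfold, PySem.Dict.getD_foldl_modify_append (pvFlat data) PySem.Dict.empty c]
  simp

-- B's first stage over one row is a Set.update with the row's non-'.' symbols
lemma pvRow_symbols (row : List String) (s : List String) :
    row.foldl (fun syms c =>
      if c != "." && !(syms.contains c) then syms ++ [c] else syms) s =
    PySem.Set.update s (row.filter (fun c => c != ".")) := by
  induction row generalizing s with
  | nil => simp [PySem.Set.update]
  | cons c row ih =>
    by_cases hc : c == "."
    · have : (c != ".") = false := by simp_all [bne]
      simp only [List.foldl_cons, List.filter_cons, this, Bool.false_and, if_false,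
        Bool.false_eq_true]
      exact ih s
    · have hb : (c != ".") = true := by simpa [bne] using hc
      simp only [List.foldl_cons, List.filter_cons, hb, Bool.true_and, if_true]
      rw [ih]
      have hupd : PySem.Set.update s (c :: List.filter (fun c => c != ".") row) =
          PySem.Set.update (PySem.Set.add s c) (List.filter (fun c => c != ".") row) := rfl
      rw [hupd]
      congr 1
      by_cases h : s.contains c <;> simp [PySem.Set.add]

-- per row: the symbols of the flat list's row segment are the row's non-'.' cells
lemma pvRowFst (row : List String) (i : Int) (m : Int) :
    ((PySem.List.enumerate row m).filterMap (fun jc =>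
        if jc.2 != "." then some (jc.2, (i, jc.1)) else none)).map (fun p => p.1) =
    row.filter (fun c => c != ".") := by
  induction row generalizing m with
  | nil => simp [PySem.List.enumerate_nil]
  | cons c row ih =>
    rw [PySem.List.enumerate_cons, List.filterMap_cons, List.filter_cons]
    by_cases h : (c != ".") = true
    · simp only [h, if_true, List.map_cons]
      rw [ih]
    · have h' : (c != ".") = false := by simpa using h
      simp only [h', if_false, Bool.false_eq_true]
      exact ih (m + 1)

-- the symbols of the flat list are the grid's non-'.' cells in row-major order
lemma pvFlatFst (data : List (List String)) (n : Int) :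
    ((PySem.List.enumerate data n).flatMap (fun ir =>
        (PySem.List.enumerate ir.2).filterMap (fun jc =>
          if jc.2 != "." then some (jc.2, (ir.1, jc.1)) else none))).map (fun p => p.1) =
    data.flatMap (fun row => row.filter (fun c => c != ".")) := by
  induction data generalizing n with
  | nil => simp [PySem.List.enumerate_nil]
  | cons row rest ih =>
    rw [PySem.List.enumerate_cons, List.flatMap_cons, List.flatMap_cons, List.map_append]
    rw [pvRowFst row n 0, ih (n + 1)]

-- B's first stage equals the distinct symbols of the flat list, in order
lemma pvSymbols_eq (data : List (List String)) (s : List String) :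
    data.foldl (fun syms row =>
      row.foldl (fun syms c =>
        if c != "." && !(syms.contains c) then syms ++ [c] else syms) syms) s =
    PySem.Set.update s ((pvFlat data).map (fun p => p.1)) := by
  have h : ∀ (t : List String), data.foldl (fun syms row =>
      row.foldl (fun syms c =>
        if c != "." && !(syms.contains c) then syms ++ [c] else syms) syms) t =
      PySem.Set.update t (data.flatMap (fun row => row.filter (fun c => c != "."))) := by
    induction data with
    | nil => intro t; simp [PySem.Set.update]
    | cons row rest ih =>
      intro t
      rw [List.foldl_cons, pvRow_symbols, ih, List.flatMap_cons]
      simp [PySem.Set.update, List.foldl_append]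
  rw [h s]
  unfold pvFlat
  rw [pvFlatFst data 0]

-- per symbol s ≠ ".": B's comprehension = the flat list restricted to s
lemma pvCoords_eq (data : List (List String)) (s : String) (hs : s ≠ ".") :
    (PySem.List.enumerate data).flatMap (fun ir =>
      (PySem.List.enumerate ir.2).filterMap (fun jc =>
        if jc.2 == s then some (ir.1, jc.1) else none)) =
    ((pvFlat data).filter (fun p => p.1 == s)).map (fun p => p.2) := by
  unfold pvFlat
  rw [List.filter_flatMap, List.map_flatMap]
  congr 1
  funext ir
  rw [List.filter_filterMap, List.map_filterMap]
  congr 1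
  funext jc
  by_cases h : jc.2 == s
  · have h2 : (jc.2 != ".") = true := by
      have : jc.2 = s := by simpa using h
      simpa [bne, this] using hs
    simp [h, h2, Option.filter]
  · by_cases h2 : jc.2 == "."
    · have : (jc.2 != ".") = false := by simpa [bne] using h2
      simp [h, this]
    · have h2' : (jc.2 != ".") = true := by simpa [bne] using h2
      simp [h, h2', Option.filter]

-- ===== VERDICT (by name: the statement is the Claim_ definition above) =====
theorem parse_antennas_spec : Claim_equal_parse_antennas := by
  intro data _
  unfold Spec_parse_antennas parse_antennas_alt
  rw [pvSymbols_eq data [], PySem.Set.update_nil_left, parse_antennas_eq_map]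
  rw [PySem.Dict.items_foldl_insert_fresh
    (PySem.Set.ofList ((pvFlat data).map (fun p => p.1))) (fun s => s)
    (fun s => (PySem.List.enumerate data).flatMap (fun ir =>
      (PySem.List.enumerate ir.2).filterMap (fun jc =>
        if jc.2 == s then some (ir.1, jc.1) else none)))
    PySem.Dict.empty
    (fun a _ => by simp [PySem.Dict.contains_empty])
    (by simp [PySem.Set.nodup_ofList ((pvFlat data).map (fun p => p.1))])]
  have hemp : (PySem.Dict.empty : PySem.Dict String (List (Int × Int))).items = [] := rfl
  rw [hemp, List.nil_append]
  apply List.map_congr_left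
  intro c hc
  have hcmem : c ∈ (pvFlat data).map (fun p => p.1) := (PySem.Set.mem_ofList _ _).mp hc
  have hcne : c ≠ "." := by
    rcases List.mem_map.mp hcmem with ⟨p, hp, hpc⟩
    unfold pvFlat at hp
    rcases List.mem_flatMap.mp hp with ⟨ir, _, hpir⟩
    rcases List.mem_filterMap.mp hpir with ⟨jc, _, hjc⟩
    by_cases h : jc.2 == "."
    · simp [bne, h] at hjc
    · have : (jc.2 != ".") = true := by simpa [bne] using h
      simp only [this, if_true, Option.some.injEq] at hjc
      subst hjc; simp only at hpc; subst hpc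
      simpa using h
  rw [pvCoords_eq data c hcne]
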